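-- pv_equiv track=rewrite | github.com/UCU-programming-tasks/skyscrapers_command_line_project | skyscrapers.py | check_uniqueness_in_columns
-- ===== SOURCE A (Python) =====
-- def check_uniqueness_in_columns(board: list):
--     """
--     Check buildings of unique height in each column.
--
--     Return True if buildings in all columns column have unique height, False otherwise.
--
--     >>> check_uniqueness_in_columns(['***21**', '412453*', '423145*', '*543215',\
--                                         '*35214*', '*41532*', '*2*1***'])
--     True
--     >>> check_uniqueness_in_columns(['***21**', '412453*', '4231452', '*543215',\
--                                         '*352142', '*41532*', '*2*1***'])
--     True
--     >>> check_uniqueness_in_columns(['***21**', '412453*', '423145*', '*543215',\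
--                                         '*35214*', '*41534*', '*2*1***'])
--     False
--     >>> check_uniqueness_in_columns(['***21**', '432453*', '423145*', '*543215',\
--                                         '*35214*', '*41532*', '*2*1***'])
--     False
--     """
--     for col_idx in range(1, len(board[0]) - 1):
--         heights = set()
--
--         for row_idx in range(1, len(board) - 1):
--             if board[row_idx][col_idx] == '*':
--                 continue
--
--             if board[row_idx][col_idx] in heights:
--                 return False
--
--             heights.add(board[row_idx][col_idx])
--
--     return True
-- ===== SOURCE B (Python) =====
-- def check_uniqueness_in_columns(board: list):
--     """Sort each interior column's non-star heights and scan adjacent pairs: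
--     a duplicate exists iff two equal heights end up next to each other."""
--     interior = board[1:-1]
--     for col_idx in range(1, len(board[0]) - 1):
--         col = sorted(row[col_idx] for row in interior
--                      if col_idx < len(row) and row[col_idx] != '*')
--         if any(a == b for a, b in zip(col, col[1:])):
--             return False
--     return True
-- ===== Notes on version B (the rewrite author's own statement) =====
-- stated objective: alternative
-- what changed: Replaces A's incremental set-with-membership-test-and-early-return duplicate detection by a sort-based one: each interior column's non-star heights are sorted and duplicates are detected by scanning adjacent pairs for equality.
-- outside the precondition, e.g. on check_uniqueness_in_columns(['1234', '1aa1', '1aa1', 'x', '1234']): A returns False, B returns False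
import Mathlib
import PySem

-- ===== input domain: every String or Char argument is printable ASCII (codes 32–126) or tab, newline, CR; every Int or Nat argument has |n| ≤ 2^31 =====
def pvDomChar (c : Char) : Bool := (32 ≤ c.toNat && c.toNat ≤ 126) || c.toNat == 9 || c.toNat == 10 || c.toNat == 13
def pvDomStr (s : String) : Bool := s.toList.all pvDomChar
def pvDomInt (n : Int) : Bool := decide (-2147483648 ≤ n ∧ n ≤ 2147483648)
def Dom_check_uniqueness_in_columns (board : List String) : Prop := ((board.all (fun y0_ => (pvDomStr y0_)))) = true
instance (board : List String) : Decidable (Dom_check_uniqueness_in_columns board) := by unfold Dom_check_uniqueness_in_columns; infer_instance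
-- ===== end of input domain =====

-- B replaces A's incremental set-with-membership-test-and-early-return duplicate detection
-- by a sort-based one: sort each interior column's non-star heights and scan adjacent pairs
-- for equality (objective: alternative algorithm of similar cost).

-- ===== PORT A =====
-- inner loop over row indices; heights is the growing set, `true` = duplicate found
-- (a `none` from string indexing is an IndexError, excluded by Pre_; the port returns false there)
def pvAInner (board : List String) (colIdx : Int) : List Int → PySem.Set Char → Bool
  | [], _ => false
  | r :: rs, heights =>
    match PySem.Str.pyGet? (PySem.List.pyGetD board r "") colIdx with
    | none => false
    | some c =>
      if c = '*' then pvAInner board colIdx rs heights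
      else if PySem.Set.contains heights c then true
      else pvAInner board colIdx rs (PySem.Set.add heights c)

-- outer loop over column indices; `return False` transliterates to returning false without recursing
def pvAOuter (board : List String) : List Int → Bool
  | [] => true
  | c :: cs =>
    if pvAInner board c (PySem.List.pyRange 1 ((board.length : Int) - 1) 1) PySem.Set.empty
    then false
    else pvAOuter board cs

def check_uniqueness_in_columns (board : List String) : Bool :=
  pvAOuter board
    (PySem.List.pyRange 1 (PySem.Str.len (PySem.List.pyGetD board 0 "") - 1) 1)

-- ===== PORT B =====
-- sorted(row[col_idx] for row in interior if col_idx < len(row) and row[col_idx] != '*')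
-- (the filterMap drops cells missing on ragged rows, exactly like B's bounds check)
def pvBColumn (interior : List String) (colIdx : Int) : List Char :=
  interior.filterMap (fun row =>
    match PySem.Str.pyGet? row colIdx with
    | some c => if c ≠ '*' then some c else none
    | none => none)

-- any(a == b for a, b in zip(col, col[1:]))
def pvBAdjEq (col : List Char) : Bool :=
  (col.zip (PySem.List.slice col (some 1) none)).any (fun p => p.1 == p.2)

def check_uniqueness_in_columns_alt (board : List String) : Bool :=
  let interior := PySem.List.slice board (some 1) (some (-1))
  (PySem.List.pyRange 1 (PySem.Str.len (PySem.List.pyGetD board 0 "") - 1) 1).all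
    (fun colIdx =>
      let col := PySem.List.sorted (pvBColumn interior colIdx) (fun c => c) false
      !(pvBAdjEq col))

-- ===== PRECONDITION & SPEC =====
-- Pre_ excludes the inputs on which A's string indexing raises IndexError: the empty board
-- (board[0]) and, when there are interior columns, boards with an interior row shorter than
-- the interior width; on a few of those A still returns False via an early duplicate, and
-- B (which skips missing cells) returns False there too — see the cite in claim.json.
def Pre_check_uniqueness_in_columns (board : List String) : Prop :=
  board ≠ [] ∧
  (2 < PySem.Str.len (PySem.List.pyGetD board 0 "") →
    ∀ s ∈ (board.drop 1).dropLast,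
      PySem.Str.len (PySem.List.pyGetD board 0 "") - 1 ≤ PySem.Str.len s)
instance (board : List String) : Decidable (Pre_check_uniqueness_in_columns board) := by
  unfold Pre_check_uniqueness_in_columns; infer_instance

def pvWitness_check_uniqueness_in_columns : List String := ["421", "1*2", "314"]

def Spec_check_uniqueness_in_columns (board : List String) (out : Bool) : Prop := out = check_uniqueness_in_columns_alt board
instance (board : List String) (out : Bool) : Decidable (Spec_check_uniqueness_in_columns board out) := by unfold Spec_check_uniqueness_in_columns; infer_instance

-- ===== CLAIM (what is proved, stated in full; the proofs are below) =====
def Claim_equal_check_uniqueness_in_columns : Prop := ∀ (board : List String), Dom_check_uniqueness_in_columns board → Pre_check_uniqueness_in_columns board → Spec_check_uniqueness_in_columns board (check_uniqueness_in_columns board)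

-- ===== LEMMAS AND PROOFS =====

-- the duplicate-detecting loop A runs, abstracted to the list of characters it visits
def pvDupLoop : PySem.Set Char → List Char → Bool
  | _, [] => false
  | s, c :: cs => if PySem.Set.contains s c then true else pvDupLoop (PySem.Set.add s c) cs

lemma pvDupLoop_false_iff (cs : List Char) : ∀ s : PySem.Set Char,
    (pvDupLoop s cs = false ↔ cs.Nodup ∧ ∀ c ∈ cs, c ∉ s) := by
  induction cs with
  | nil => intro s; simp [pvDupLoop]
  | cons c cs ih =>
    intro s
    simp only [pvDupLoop]
    by_cases h : c ∈ s
    · have hc : PySem.Set.contains s c = true := by simpa [PySem.Set.contains_iff]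
      simp [h]
    · have hc : PySem.Set.contains s c = false := by
        rw [← Bool.not_eq_true, PySem.Set.contains_iff]; exact h
      rw [hc]
      simp only [Bool.false_eq_true, if_false, ih (PySem.Set.add s c)]
      constructor
      · rintro ⟨hnd, hall⟩
        refine ⟨List.nodup_cons.mpr ⟨fun hm => ?_, hnd⟩, ?_⟩
        · exact (hall c hm) ((PySem.Set.mem_add _ _ _).mpr (Or.inr rfl))
        · intro x hx
          rcases List.mem_cons.mp hx with rfl | hx
          · exact h
          · intro hxs
            exact (hall x hx) ((PySem.Set.mem_add _ _ _).mpr (Or.inl hxs))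
      · rintro ⟨hnd, hall⟩
        rcases List.nodup_cons.mp hnd with ⟨hcn, hnd'⟩
        refine ⟨hnd', fun x hx hxa => ?_⟩
        rcases (PySem.Set.mem_add _ _ _).mp hxa with hxs | rfl
        · exact (hall x (List.mem_cons_of_mem _ hx)) hxs
        · exact hcn hx

lemma pvDupLoop_empty (col : List Char) :
    pvDupLoop PySem.Set.empty col = !(decide col.Nodup) := by
  cases hd : pvDupLoop PySem.Set.empty col with
  | false =>
    have := (pvDupLoop_false_iff col PySem.Set.empty).mp hd
    simp [this.1]
  | true =>
    have hnd : ¬ col.Nodup := by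
      intro hn
      have hf : pvDupLoop PySem.Set.empty col = false :=
        (pvDupLoop_false_iff col PySem.Set.empty).mpr
          ⟨hn, fun c _ hc => by simp [PySem.Set.empty] at hc⟩
      rw [hd] at hf
      exact absurd hf (by simp)
    simp [hnd]

-- adjacent-equal scan on a ≤-sorted list detects exactly non-Nodup
lemma pvBAdjEq_of_pairwise (col : List Char) (hp : col.Pairwise (· ≤ ·)) :
    pvBAdjEq col = !(decide col.Nodup) := by
  induction col with
  | nil => simp [pvBAdjEq]
  | cons a l ih =>
    cases l with
    | nil => simp [pvBAdjEq, PySem.List.slice_from_one]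
    | cons b t =>
      rcases List.pairwise_cons.mp hp with ⟨ha, hp'⟩
      have hab : a ≤ b := ha b (by simp)
      have hbt : ∀ x ∈ t, b ≤ x := fun x hx => (List.pairwise_cons.mp hp').1 x hx
      have hrec := ih hp'
      simp only [pvBAdjEq, PySem.List.slice_from_one, List.tail_cons] at hrec ⊢
      rw [List.zip_cons_cons, List.any_cons]
      by_cases heq : a = b
      · subst heq
        have hnd : ¬ (a :: a :: t).Nodup := by simp
        simp [hnd]
      · have hna : a ∉ b :: t := by
          intro hm
          rcases List.mem_cons.mp hm with rfl | hm
          · exact heq rfl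
          · have : b ≤ a := hbt a hm
            exact heq (le_antisymm hab this)
        have hiff : (a :: b :: t).Nodup ↔ (b :: t).Nodup := by
          rw [List.nodup_cons]
          exact ⟨fun h => h.2, fun h => ⟨hna, h⟩⟩
        have hb : (a == b) = false := by simp [heq]
        rw [hb]
        simp only [Bool.false_or]
        rw [hrec]
        congr 1
        rw [decide_eq_decide]
        exact hiff.symm

-- A's inner loop over in-range row indices equals pvDupLoop on the visited non-star chars
lemma pvAInner_eq_dupLoop (board : List String) (colIdx : Int) (rs : List Int)
    (hok : ∀ r ∈ rs, (PySem.Str.pyGet? (PySem.List.pyGetD board r "") colIdx).isSome) :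
    ∀ h : PySem.Set Char,
    pvAInner board colIdx rs h =
      pvDupLoop h (rs.filterMap (fun r =>
        match PySem.Str.pyGet? (PySem.List.pyGetD board r "") colIdx with
        | some c => if c ≠ '*' then some c else none
        | none => none)) := by
  induction rs with
  | nil => intro h; simp [pvAInner, pvDupLoop]
  | cons r rs ih =>
    intro h
    have hr := hok r (by simp)
    obtain ⟨c, hc⟩ := Option.isSome_iff_exists.mp hr
    have hrest : ∀ r ∈ rs, (PySem.Str.pyGet? (PySem.List.pyGetD board r "") colIdx).isSome :=
      fun r hm => hok r (by simp [hm])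
    simp only [pvAInner, List.filterMap_cons, hc]
    by_cases hstar : c = '*'
    · subst hstar; simp [ih hrest]
    · simp only [hstar, ne_eq, not_false_iff, if_pos]
      simp [pvDupLoop, ih hrest]

lemma pvAOuter_eq_all (board : List String) (p : Int → Bool) (cs : List Int)
    (hcol : ∀ c ∈ cs,
      pvAInner board c (PySem.List.pyRange 1 ((board.length : Int) - 1) 1) PySem.Set.empty
        = !(p c)) :
    pvAOuter board cs = cs.all p := by
  induction cs with
  | nil => simp [pvAOuter]
  | cons c cs ih =>
    have h1 := hcol c (by simp)
    have h2 : ∀ c ∈ cs, _ := fun c hm => hcol c (by simp [hm])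
    simp only [pvAOuter, h1, List.all_cons]
    cases hp : p c with
    | false => simp
    | true => simp [ih h2]

lemma pvSlice_eq (board : List String) (hb : board ≠ []) :
    PySem.List.slice board (some 1) (some (-1)) = (board.drop 1).take (board.length - 2) := by
  have hl : 0 < board.length := List.length_pos_iff.mpr hb
  simp [PySem.List.slice, Nat.min_eq_left hl]
  omega

lemma pvMapRange_eq (board : List String) (_h : board ≠ []) :
    (PySem.List.pyRange 1 ((board.length:Int) - 1) 1).map (fun r => PySem.List.pyGetD board r "")
      = (board.drop 1).take (board.length - 2) := by
  rw [PySem.List.pyRange_one]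
  have ht : (((board.length:Int) - 1) - 1).toNat = board.length - 2 := by omega
  rw [ht, List.map_map]
  apply List.ext_getElem
  · simp; omega
  · intro i h1 h2
    simp only [List.getElem_map, List.getElem_range, Function.comp_apply]
    have hi : i < board.length - 2 := by simpa using h1
    have hget : PySem.List.pyGetD board ((1:Int) + i) "" = board[(1 + i : Nat)]'(by omega) := by
      have := PySem.List.pyGetD_eq_getElem (xs := board) (i := (1:Int) + i) (d := "") (by omega) (by omega)
      simpa using this
    rw [hget, List.getElem_take, List.getElem_drop]

lemma pvInterior_dropLast (board : List String) :
    (board.drop 1).dropLast = (board.drop 1).take (board.length - 2) := by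
  rw [List.dropLast_eq_take]
  congr 1
  simp
  omega

-- ===== VERDICT (by name: the statement is the Claim_ definition above) =====
theorem check_uniqueness_in_columns_spec : Claim_equal_check_uniqueness_in_columns := by
  intro board _hdom hpre
  unfold Spec_check_uniqueness_in_columns
  obtain ⟨hne, hrows⟩ := hpre
  simp only [check_uniqueness_in_columns, check_uniqueness_in_columns_alt]
  rw [pvAOuter_eq_all]
  intro c hc
  rw [PySem.List.mem_pyRange_one] at hc
  have hW : 2 < PySem.Str.len (PySem.List.pyGetD board 0 "") := by omega
  have hok : ∀ r ∈ PySem.List.pyRange 1 ((board.length : Int) - 1) 1,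
      (PySem.Str.pyGet? (PySem.List.pyGetD board r "") c).isSome := by
    intro r hr
    rw [PySem.List.mem_pyRange_one] at hr
    have hrn : PySem.List.pyGetD board r "" = board[r.toNat]'(by omega) := by
      have := PySem.List.pyGetD_eq_getElem (xs := board) (i := r) (d := "") (by omega) (by omega)
      simpa using this
    have hmem : board[r.toNat]'(by omega) ∈ (board.drop 1).dropLast := by
      rw [pvInterior_dropLast]
      have hidx : r.toNat - 1 < ((board.drop 1).take (board.length - 2)).length := by
        simp; omega
      have : ((board.drop 1).take (board.length - 2))[r.toNat - 1]'hidx = board[r.toNat]'(by omega) := by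
        rw [List.getElem_take, List.getElem_drop]
        congr 1
        omega
      rw [← this]
      exact List.getElem_mem hidx
    have hmem' : PySem.List.pyGetD board r "" ∈ (board.drop 1).dropLast := by
      rw [hrn]; exact hmem
    have hlen := hrows hW _ hmem'
    have he : PySem.Str.len (PySem.List.pyGetD board r "")
        = ((PySem.List.pyGetD board r "").toList.length : Int) := by simp [PySem.Str.len_eq]
    have hrw : PySem.Str.pyGet? (PySem.List.pyGetD board r "") c
        = PySem.List.pyGet? (PySem.List.pyGetD board r "").toList c := rfl
    rw [hrw, PySem.List.pyGet?_of_nonneg _ (by omega)]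
    have hlt : c.toNat < (PySem.List.pyGetD board r "").toList.length := by omega
    simp [List.getElem?_eq_getElem hlt]
  rw [pvAInner_eq_dupLoop board c _ hok, pvDupLoop_empty]
  have hcol : (PySem.List.pyRange 1 ((board.length : Int) - 1) 1).filterMap (fun r =>
        match PySem.Str.pyGet? (PySem.List.pyGetD board r "") c with
        | some ch => if ch ≠ '*' then some ch else none
        | none => none)
      = pvBColumn (PySem.List.slice board (some 1) (some (-1))) c := by
    rw [pvBColumn, pvSlice_eq board hne, ← pvMapRange_eq board hne, List.filterMap_map]
    rfl
  rw [hcol]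
  rw [pvBAdjEq_of_pairwise _ (PySem.List.sorted_pairwise _ _)]
  have hperm : (PySem.List.sorted (pvBColumn (PySem.List.slice board (some 1) (some (-1))) c)
      (fun x => x) false).Nodup ↔ (pvBColumn (PySem.List.slice board (some 1) (some (-1))) c).Nodup :=
    (PySem.List.sorted_perm _ _ _).nodup_iff
  simp [hperm]
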